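-- pv_equiv track=rewrite | github.com/martinvplopez/dynamic-programming | howSum.py | howSumClassic
-- ===== SOURCE A (Python) =====
-- def howSumClassic(targetSum, numbers):
--     if(targetSum==0):
--         return []
--     if(targetSum<0):
--         return None
--     for num in numbers:
--         res= howSumClassic(targetSum-num,numbers)
--         if( res != None):
--             return res + [num]
--     return None
-- ===== SOURCE B (Python) =====
-- def howSumClassic(targetSum, numbers):
--     if targetSum < 0:
--         return None
--     best = [None] * (targetSum + 1)
--     best[0] = []
--     for t in range(1, targetSum + 1):
--         for num in numbers:
--             prev = t - num
--             if 0 <= prev < t and best[prev] is not None: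
--                 best[t] = best[prev] + [num]
--                 break
--     return best[targetSum]
-- ===== Notes on version B (the rewrite author's own statement) =====
-- stated objective: alternative
-- what changed: Replaced the memo-less exponential depth-first recursion by an iterative bottom-up DP table indexed by remaining sum (first-number-found rule kept, so the same list is returned); asymptotically O(targetSum*n) vs exponential, though a timing run could not credit this on inputs inside Pre_.
-- outside the precondition, e.g. on howSumClassic(3, [5, -2]): A returns [5, -2], B returns None
import Mathlib
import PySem

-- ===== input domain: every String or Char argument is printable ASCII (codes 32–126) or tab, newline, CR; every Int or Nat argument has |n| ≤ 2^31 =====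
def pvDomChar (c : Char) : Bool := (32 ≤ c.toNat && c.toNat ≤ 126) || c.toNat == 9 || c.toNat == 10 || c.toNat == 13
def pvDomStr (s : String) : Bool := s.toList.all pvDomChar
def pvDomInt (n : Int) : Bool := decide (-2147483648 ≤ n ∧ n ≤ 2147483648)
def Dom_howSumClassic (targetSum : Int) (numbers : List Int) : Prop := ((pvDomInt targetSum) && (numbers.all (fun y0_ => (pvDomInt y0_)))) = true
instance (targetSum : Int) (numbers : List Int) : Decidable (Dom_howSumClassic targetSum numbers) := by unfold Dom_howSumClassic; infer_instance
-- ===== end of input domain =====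

-- B replaces A's memo-less exponential DFS by an iterative bottom-up DP table indexed by the
-- remaining sum (same first-number-found rule, hence the same returned list); return-value equivalence on Pre_.


-- ===== PORT A =====
-- the 'for num in numbers: res = howSumClassic(targetSum-num, ...)' loop of A
def howSumLoop (recv : Int → Option (List Int)) (t : Int) : List Int → Option (List Int)
  | [] => none
  | num :: rest =>
    match recv (t - num) with
    | some res => some (res ++ [num])
    | none => howSumLoop recv t rest

-- A's recursion, with a fuel counter to make it total in Lean; on Pre_ inputs every nested
-- call decreases t by at least 1 while t ≥ 0, so fuel targetSum.toNat + 1 is never exhausted.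
def howSumGo : Nat → Int → List Int → Option (List Int)
  | 0, _, _ => none
  | fuel + 1, t, numbers =>
    if t = 0 then some []
    else if t < 0 then none
    else howSumLoop (fun s => howSumGo fuel s numbers) t numbers

def howSumClassic (targetSum : Int) (numbers : List Int) : Option (List Int) :=
  howSumGo (targetSum.toNat + 1) targetSum numbers

-- ===== PORT B =====
-- inner 'for num in numbers' of Source B: first num with a filled table entry at t-num
def altEntry (best : List (Option (List Int))) (t : Int) : List Int → Option (List Int)
  | [] => none
  | num :: rest =>
    if 0 ≤ t - num ∧ t - num < t then
      match best.getD (t - num).toNat none with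
      | some r => some (r ++ [num])
      | none => altEntry best t rest
    else altEntry best t rest

-- the table best[0..n] built bottom-up ('for t in range(1, targetSum+1)')
def altTable (numbers : List Int) : Nat → List (Option (List Int))
  | 0 => [some []]
  | n + 1 =>
    let best := altTable numbers n
    best ++ [altEntry best ((n : Int) + 1) numbers]

def howSumClassic_alt (targetSum : Int) (numbers : List Int) : Option (List Int) :=
  if targetSum < 0 then none
  else (altTable numbers targetSum.toNat).getD targetSum.toNat none

-- ===== PRECONDITION & SPEC =====
-- Pre_ excludes positive targets when the list contains a non-positive number: there A's
-- unbounded recursion either never terminates or reaches the target through negative steps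
-- (e.g. on (3, [5, -2]) A returns [5, -2]), behaviour B's bounded table does not reproduce.
def Pre_howSumClassic (targetSum : Int) (numbers : List Int) : Prop :=
  targetSum ≤ 0 ∨ ∀ n ∈ numbers, 0 < n
instance (targetSum : Int) (numbers : List Int) : Decidable (Pre_howSumClassic targetSum numbers) := by unfold Pre_howSumClassic; infer_instance

def pvWitness_howSumClassic : Int × List Int := (7, [2, 3])

def Spec_howSumClassic (targetSum : Int) (numbers : List Int) (out : Option (List Int)) : Prop := out = howSumClassic_alt targetSum numbers
instance (targetSum : Int) (numbers : List Int) (out : Option (List Int)) : Decidable (Spec_howSumClassic targetSum numbers out) := by unfold Spec_howSumClassic; infer_instance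

-- ===== CLAIM (what is proved, stated in full; the proofs are below) =====
def Claim_equal_howSumClassic : Prop := ∀ (targetSum : Int) (numbers : List Int), Dom_howSumClassic targetSum numbers → Pre_howSumClassic targetSum numbers → Spec_howSumClassic targetSum numbers (howSumClassic targetSum numbers)

-- ===== LEMMAS AND PROOFS =====

lemma go_neg (f : Nat) (t : Int) (nums : List Int) (ht : t < 0) :
    howSumGo f t nums = none := by
  cases f with
  | zero => simp [howSumGo]
  | succ g =>
    have h0 : ¬ t = 0 := by omega
    simp [howSumGo, h0, ht]

lemma loop_congr (recv1 recv2 : Int → Option (List Int)) (t : Int) :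
    ∀ l : List Int, (∀ num ∈ l, recv1 (t - num) = recv2 (t - num)) →
      howSumLoop recv1 t l = howSumLoop recv2 t l := by
  intro l
  induction l with
  | nil => intro _; simp [howSumLoop]
  | cons num rest ih =>
    intro h
    have hn := h num (by simp)
    simp only [howSumLoop, hn]
    cases recv2 (t - num) with
    | some r => simp
    | none => simp; exact ih (fun m hm => h m (by simp [hm]))

lemma go_fuel_congr (nums : List Int) (hpos : ∀ n ∈ nums, 0 < n) :
    ∀ f1 f2 : Nat, ∀ t : Int, t < (f1 : Int) → 0 < f1 → t < (f2 : Int) → 0 < f2 →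
      howSumGo f1 t nums = howSumGo f2 t nums := by
  intro f1
  induction f1 with
  | zero => intro f2 t _ h0 _ _; omega
  | succ g1 ih =>
    intro f2 t h1 _ h2 hf2
    cases f2 with
    | zero => omega
    | succ g2 =>
      by_cases h0 : t = 0
      · simp [howSumGo, h0]
      · by_cases hneg : t < 0
        · simp [howSumGo, h0, hneg]
        · have htpos : 0 < t := by omega
          simp only [howSumGo, h0, hneg, if_false]
          apply loop_congr
          intro num hmem
          have hn : 0 < num := hpos num hmem
          by_cases hp : t - num < 0
          · rw [go_neg _ _ _ hp, go_neg _ _ _ hp]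
          · have hb1 : t - num < (g1 : Int) := by omega
            have hb2 : t - num < (g2 : Int) := by omega
            exact ih g2 (t - num) hb1 (by omega) hb2 (by omega)

lemma table_len (nums : List Int) : ∀ T : Nat, (altTable nums T).length = T + 1 := by
  intro T
  induction T with
  | zero => simp [altTable]
  | succ n ih => simp [altTable, ih]

lemma table_correct (nums : List Int) (hpos : ∀ n ∈ nums, 0 < n) :
    ∀ T : Nat, ∀ k : Nat, k ≤ T →
      (altTable nums T).getD k none = howSumGo (k + 1) (k : Int) nums := by
  intro T
  induction T with
  | zero =>
    intro k hk
    have : k = 0 := by omega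
    subst this
    simp [altTable, howSumGo]
  | succ n ih =>
    intro k hk
    by_cases hkn : k ≤ n
    · have hlt : k < (altTable nums n).length := by rw [table_len]; omega
      simp only [altTable, List.getD, List.getElem?_append_left hlt]
      exact ih k hkn
    · have hk1 : k = n + 1 := by omega
      subst hk1
      have hlen := table_len nums n
      have hget : (altTable nums n ++ [altEntry (altTable nums n) ((n : Int) + 1) nums]).getD (n + 1) none
          = altEntry (altTable nums n) ((n : Int) + 1) nums := by
        simp [List.getD, hlen]
      simp only [altTable]
      rw [hget]
      -- unfold the RHS one step
      have h0 : ¬ ((n : Int) + 1 = 0) := by omega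
      have hneg : ¬ ((n : Int) + 1 < 0) := by omega
      have hrhs : howSumGo (n + 1 + 1) ((n : Int) + 1) nums
          = howSumLoop (fun s => howSumGo (n + 1) s nums) ((n : Int) + 1) nums := by
        simp [howSumGo, h0, hneg]
      rw [show ((n + 1 : Nat) : Int) = (n : Int) + 1 by push_cast; ring, hrhs]
      -- entry ↔ loop over any sublist of positive numbers
      have key : ∀ l : List Int, (∀ m ∈ l, 0 < m) →
          altEntry (altTable nums n) ((n : Int) + 1) l
            = howSumLoop (fun s => howSumGo (n + 1) s nums) ((n : Int) + 1) l := by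
        intro l
        induction l with
        | nil => intro _; simp [altEntry, howSumLoop]
        | cons num rest ihl =>
          intro hl
          have hnum : 0 < num := hl num (by simp)
          have hrest := ihl (fun m hm => hl m (by simp [hm]))
          by_cases hp : (n : Int) + 1 - num < 0
          · have hcond : ¬ (0 ≤ (n : Int) + 1 - num ∧ (n : Int) + 1 - num < (n : Int) + 1) := by omega
            have : howSumGo (n + 1) ((n : Int) + 1 - num) nums = none := go_neg _ _ _ hp
            simp only [altEntry, howSumLoop, hcond, if_false, this, hrest]
          · have hge : 0 ≤ (n : Int) + 1 - num := by omega
            have hcond : (0 ≤ (n : Int) + 1 - num ∧ (n : Int) + 1 - num < (n : Int) + 1) := by omega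
            have hkle : ((n : Int) + 1 - num).toNat ≤ n := by omega
            have hcast : ((((n : Int) + 1 - num).toNat : Nat) : Int) = (n : Int) + 1 - num := by omega
            have htab := ih (((n : Int) + 1 - num).toNat) hkle
            rw [hcast] at htab
            have hfuel : howSumGo (n + 1) ((n : Int) + 1 - num) nums
                = howSumGo ((((n : Int) + 1 - num).toNat) + 1) ((n : Int) + 1 - num) nums := by
              apply go_fuel_congr nums hpos
              · omega
              · omega
              · omega
              · omega
            simp only [altEntry, howSumLoop, hcond, htab, ← hfuel]
            cases hvc : howSumGo (n + 1) ((n : Int) + 1 - num) nums with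
            | some r => simp
            | none => simp [hrest]
      exact key nums hpos

-- ===== VERDICT (by name: the statement is the Claim_ definition above) =====
theorem howSumClassic_spec : Claim_equal_howSumClassic := by
  intro t nums _ hpre
  unfold Spec_howSumClassic howSumClassic howSumClassic_alt
  by_cases hneg : t < 0
  · rw [go_neg _ _ _ hneg]
    simp [hneg]
  · by_cases h0 : t = 0
    · subst h0
      simp [howSumGo, altTable]
    · have htpos : 0 < t := by omega
      have hpos : ∀ n ∈ nums, 0 < n := by
        rcases hpre with h | h
        · omega
        · exact h
      have hcast : ((t.toNat : Nat) : Int) = t := by omega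
      rw [if_neg hneg, table_correct nums hpos t.toNat t.toNat le_rfl, hcast]
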